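-- pv_equiv track=rewrite | github.com/gumdropsteve/intro_to_python_solns | code_challenges/count_isograms.py | count_isograms
-- ===== SOURCE A (Python) =====
-- def count_isograms(list_of_words):
--     # initiate a count
--     isogram_count = 0
--
--     # go through each word in the list
--     for word in list_of_words:
--
--         # make a note of how long a word is
--         word_length = len(word)
--         # start a count of how many unique letters are in that word
--         unique_letters_in_word = 0
--
--         # go through each letter in that word
--         for letter in word:
--             # if the letter occours just once
--             if word.count(letter) == 1:
--                 # add 1 to the number of unique letters in the word
--                 unique_letters_in_word += 1
--
--         # if all letters in the word are unique
--         if word_length == unique_letters_in_word: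
--             # add 1 to the count of isograms
--             isogram_count += 1
--
--     # output the final count
--     return isogram_count
-- ===== SOURCE B (Python) =====
-- def count_isograms(list_of_words):
--     # sort-then-adjacent-scan: a word is an isogram iff no two consecutive
--     # characters of its sorted character list are equal
--     isogram_count = 0
--     for word in list_of_words:
--         chars = sorted(word)
--         if all(a != b for a, b in zip(chars, chars[1:])):
--             isogram_count += 1
--     return isogram_count
-- ===== Notes on version B (the rewrite author's own statement) =====
-- stated objective: alternative
-- what changed: replaces the per-letter occurrence-counting inner loop (word.count for every letter) by sorting the word once and checking that no two adjacent sorted characters are equal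
import Mathlib
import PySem

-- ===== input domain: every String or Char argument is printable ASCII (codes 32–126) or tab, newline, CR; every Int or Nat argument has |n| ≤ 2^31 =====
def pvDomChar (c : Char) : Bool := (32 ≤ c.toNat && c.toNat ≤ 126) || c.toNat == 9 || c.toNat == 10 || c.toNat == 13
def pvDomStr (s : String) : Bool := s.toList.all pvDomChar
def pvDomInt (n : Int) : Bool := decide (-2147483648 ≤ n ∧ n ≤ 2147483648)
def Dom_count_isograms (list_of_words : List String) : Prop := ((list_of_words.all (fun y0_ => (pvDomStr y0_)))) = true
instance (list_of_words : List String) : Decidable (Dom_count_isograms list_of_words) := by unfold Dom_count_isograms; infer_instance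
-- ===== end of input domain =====

-- B detects isograms by sorting each word and scanning adjacent characters instead of
-- A's per-letter occurrence counting (a different algorithm of similar measured cost).

-- ===== PORT A =====
-- word.count(letter) for a single character letter is exactly the number of
-- occurrences of that character, ported as PySem.List.count on the code points (exact).
def count_isograms (list_of_words : List String) : Int :=
  list_of_words.foldl (fun isogram_count word =>
    let word_length : Int := (word.toList.length : Int)
    let unique_letters_in_word : Int :=
      word.toList.foldl (fun u letter =>
        if PySem.List.count word.toList letter == 1 then u + 1 else u) 0
    if word_length == unique_letters_in_word then isogram_count + 1 else isogram_count) 0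

-- ===== PORT B =====
def count_isograms_alt (list_of_words : List String) : Int :=
  list_of_words.foldl (fun isogram_count word =>
    let chars := PySem.List.sorted word.toList (fun c => c) false
    if (chars.zip chars.tail).all (fun p => !(p.1 == p.2)) then isogram_count + 1
    else isogram_count) 0

-- ===== PRECONDITION & SPEC =====
def Spec_count_isograms (list_of_words : List String) (out : Int) : Prop := out = count_isograms_alt list_of_words
instance (list_of_words : List String) (out : Int) : Decidable (Spec_count_isograms list_of_words out) := by unfold Spec_count_isograms; infer_instance

-- ===== CLAIM (what is proved, stated in full; the proofs are below) =====
def Claim_equal_count_isograms : Prop := ∀ (list_of_words : List String), Dom_count_isograms list_of_words → Spec_count_isograms list_of_words (count_isograms list_of_words)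

-- ===== LEMMAS AND PROOFS =====

-- the adjacent-pair scan of B is the chain of ≠ over adjacent elements
theorem allZip_ne_iff_chain (l : List Char) :
    ((l.zip l.tail).all (fun p => !(p.1 == p.2)) = true) ↔ l.IsChain (· ≠ ·) := by
  induction l with
  | nil => simp
  | cons a t ih =>
    cases t with
    | nil => simp
    | cons b t' =>
      rw [List.isChain_cons_cons]
      simp only [List.tail_cons, List.zip_cons_cons, List.all_cons, Bool.and_eq_true] at *
      constructor
      · rintro ⟨h1, h2⟩; exact ⟨by simpa using h1, ih.mp h2⟩
      · rintro ⟨h1, h2⟩; exact ⟨by simpa using h1, ih.mpr h2⟩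

-- a ≤-pairwise list whose adjacent elements differ has no duplicates
theorem nodup_of_pairwise_le_chain_ne (l : List Char)
    (hp : l.Pairwise (· ≤ ·)) (hc : l.IsChain (· ≠ ·)) : l.Nodup := by
  have hlt : l.IsChain (· < ·) := by
    induction l with
    | nil => simp
    | cons a t ih =>
      cases t with
      | nil => simp
      | cons b t' =>
        rw [List.isChain_cons_cons] at hc ⊢
        rw [List.pairwise_cons] at hp
        exact ⟨lt_of_le_of_ne (hp.1 b (by simp)) hc.1, ih hp.2 hc.2⟩
  have : l.Pairwise (· < ·) := List.isChain_iff_pairwise.mp hlt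
  exact this.imp ne_of_lt

-- B's per-word test holds iff the word's characters are all distinct
theorem b_test_iff_nodup (l : List Char) :
    (((PySem.List.sorted l (fun c => c) false).zip
        (PySem.List.sorted l (fun c => c) false).tail).all (fun p => !(p.1 == p.2)) = true)
      ↔ l.Nodup := by
  set s := PySem.List.sorted l (fun c => c) false with hs
  have hperm : s.Perm l := PySem.List.sorted_perm l (fun c => c) false
  rw [allZip_ne_iff_chain]
  constructor
  · intro hc
    exact hperm.nodup_iff.mp
      (nodup_of_pairwise_le_chain_ne s (PySem.List.sorted_pairwise l (fun c => c)) hc)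
  · intro hn
    exact List.Pairwise.isChain (hperm.nodup_iff.mpr hn)

-- A's per-word test holds iff the word's characters are all distinct
theorem a_test_iff_nodup (l : List Char) :
    ((((l.length : Int)) ==
        l.foldl (fun u letter => if PySem.List.count l letter == 1 then u + 1 else u) 0) = true)
      ↔ l.Nodup := by
  rw [PySem.List.foldl_if_add_one (fun letter => PySem.List.count l letter == 1) l 0]
  simp only [PySem.List.count_eq, zero_add, beq_iff_eq, Nat.cast_inj]
  rw [eq_comm]
  constructor
  · intro h
    rw [List.nodup_iff_count_le_one]
    intro a
    by_cases hm : a ∈ l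
    · have := (List.countP_eq_length).mp h a hm
      simp only [beq_iff_eq] at this
      omega
    · simp [List.count_eq_zero_of_not_mem hm]
  · intro hn
    apply List.countP_eq_length.mpr
    intro a ha
    simp [List.count_eq_one_of_mem hn ha]

-- the two per-word tests agree
theorem tests_eq (w : String) :
    (((w.toList.length : Int)) ==
        w.toList.foldl (fun u letter => if PySem.List.count w.toList letter == 1 then u + 1 else u) 0)
      = ((PySem.List.sorted w.toList (fun c => c) false).zip
          (PySem.List.sorted w.toList (fun c => c) false).tail).all (fun p => !(p.1 == p.2)) := by
  rw [Bool.eq_iff_iff, a_test_iff_nodup, b_test_iff_nodup]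

theorem fold_eq (ws : List String) (acc : Int) :
    ws.foldl (fun isogram_count word =>
      let word_length : Int := (word.toList.length : Int)
      let unique_letters_in_word : Int :=
        word.toList.foldl (fun u letter =>
          if PySem.List.count word.toList letter == 1 then u + 1 else u) 0
      if word_length == unique_letters_in_word then isogram_count + 1 else isogram_count) acc
    = ws.foldl (fun isogram_count word =>
      let chars := PySem.List.sorted word.toList (fun c => c) false
      if (chars.zip chars.tail).all (fun p => !(p.1 == p.2)) then isogram_count + 1
      else isogram_count) acc := by
  induction ws generalizing acc with
  | nil => rfl
  | cons w t ih =>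
    simp only [List.foldl_cons]
    rw [show (let word_length : Int := (w.toList.length : Int)
      let unique_letters_in_word : Int :=
        w.toList.foldl (fun u letter =>
          if PySem.List.count w.toList letter == 1 then u + 1 else u) 0
      if word_length == unique_letters_in_word then acc + 1 else acc)
      = (let chars := PySem.List.sorted w.toList (fun c => c) false
        if (chars.zip chars.tail).all (fun p => !(p.1 == p.2)) then acc + 1 else acc) by
      simp only []
      rw [tests_eq w]]
    exact ih _

-- ===== VERDICT (by name: the statement is the Claim_ definition above) =====
theorem count_isograms_spec : Claim_equal_count_isograms := by
  intro ws _
  unfold Spec_count_isograms count_isograms count_isograms_alt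
  exact fold_eq ws 0
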